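-- pv_equiv track=rewrite | github.com/joninafta/open-nic-shell-ji-mb | plugin/p2p/box_250mhz/filter_rx_pipeline/tb/axi_stream_driver.py | _beat_to_bytes
-- ===== SOURCE A (Python) =====
-- def _beat_to_bytes(data: int, keep: int):
--     """Convert AXI Stream beat to bytes"""
--     bytes_per_beat = 64
--     beat_bytes = []
--
--     # Convert data to bytes (big-endian)
--     data_bytes = data.to_bytes(bytes_per_beat, byteorder='big')
--
--     # Extract valid bytes based on keep mask
--     for i in range(bytes_per_beat):
--         if keep & (1 << (bytes_per_beat - 1 - i)):  # MSB first
--             beat_bytes.append(data_bytes[i])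
--         else:
--             break  # Stop at first invalid byte
--
--     return beat_bytes
-- ===== SOURCE B (Python) =====
-- def _beat_to_bytes(data: int, keep: int):
--     """Convert AXI Stream beat to bytes"""
--     data_bytes = data.to_bytes(64, byteorder='big')
--     # number of leading (MSB-first) set bits of the 64-bit keep mask:
--     # complement keep within 64 bits; its bit-length is 64 minus that count
--     count = 64 - ((~keep) & ((1 << 64) - 1)).bit_length()
--     return list(data_bytes[:count])
-- ===== Notes on version B (the rewrite author's own statement) =====
-- stated objective: simpler
-- what changed: The per-byte MSB-first loop with break is replaced by a closed-form count of leading set bits of the 64-bit keep mask (bit_length of its complement) followed by a single slice of the byte string; Pre_ excludes only data outside [0, 2^512) where data.to_bytes raises OverflowError in both programs.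
import Mathlib
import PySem

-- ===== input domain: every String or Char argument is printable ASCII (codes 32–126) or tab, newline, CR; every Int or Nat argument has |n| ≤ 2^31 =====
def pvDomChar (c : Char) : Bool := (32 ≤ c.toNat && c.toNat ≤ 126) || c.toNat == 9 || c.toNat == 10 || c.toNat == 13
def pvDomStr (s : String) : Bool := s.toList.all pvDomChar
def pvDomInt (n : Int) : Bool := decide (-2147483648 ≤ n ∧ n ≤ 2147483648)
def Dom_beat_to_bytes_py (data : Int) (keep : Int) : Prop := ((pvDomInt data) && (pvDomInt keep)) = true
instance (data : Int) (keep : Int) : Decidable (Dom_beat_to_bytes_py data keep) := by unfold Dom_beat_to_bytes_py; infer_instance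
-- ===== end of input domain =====

-- B is simpler: the per-byte scan-with-break becomes a closed-form leading-ones
-- count (bit_length of the complemented 64-bit keep mask) plus one slice.

-- ===== PORT A =====
-- shared helper: data.to_bytes(64, byteorder='big') — exact hand port for
-- 0 ≤ data < 2^512 (Python raises OverflowError otherwise; Pre_ excludes those):
-- big-endian byte i is (data >> (8*(63-i))) & 0xff.
def pvToBytes64 (data : Int) : List Int :=
  (List.range 64).map (fun i => PySem.Int.mod (data >>> (8 * (63 - i))) 256)

-- the loop 'for i in range(64): if keep & (1 << (64-1-i)): append(data_bytes[i]) else: break';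
-- the bytes index i is always in range, so pyGetD's default is never used
def beatLoopA (db : List Int) (keep : Int) (i : Nat) (acc : List Int) : List Int :=
  if h : i < 64 then
    if PySem.Int.band keep (1 <<< (64 - 1 - i)) ≠ 0 then
      beatLoopA db keep (i + 1) (acc ++ [PySem.List.pyGetD db (i : Int) 0])
    else acc
  else acc
termination_by 64 - i

def beat_to_bytes_py (data : Int) (keep : Int) : List Int :=
  beatLoopA (pvToBytes64 data) keep 0 []

-- ===== PORT B =====
def beat_to_bytes_py_alt (data : Int) (keep : Int) : List Int :=
  let data_bytes := pvToBytes64 data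
  -- count = 64 - ((~keep) & ((1 << 64) - 1)).bit_length()
  let count : Int :=
    64 - (PySem.Int.bitLength (PySem.Int.band (Int.not keep) ((1 <<< 64) - 1)) : Int)
  PySem.List.slice data_bytes none (some count)

-- ===== PRECONDITION & SPEC =====
-- data.to_bytes(64, 'big') raises OverflowError for negative data and for data ≥ 2^512
-- (both programs raise identically there); Pre_ admits exactly the returning inputs.
def Pre_beat_to_bytes_py (data : Int) (keep : Int) : Prop := 0 ≤ data ∧ data < 13407807929942597099574024998205846127479365820592393377723561443721764030073546976801874298166903427690031858186486050853753882811946569946433649006084096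
instance (data : Int) (keep : Int) : Decidable (Pre_beat_to_bytes_py data keep) := by
  unfold Pre_beat_to_bytes_py; infer_instance

def pvWitness_beat_to_bytes_py : Int × Int := (77, -6)

def Spec_beat_to_bytes_py (data : Int) (keep : Int) (out : List Int) : Prop := out = beat_to_bytes_py_alt data keep
instance (data : Int) (keep : Int) (out : List Int) : Decidable (Spec_beat_to_bytes_py data keep out) := by unfold Spec_beat_to_bytes_py; infer_instance

-- ===== CLAIM (what is proved, stated in full; the proofs are below) =====
def Claim_equal_beat_to_bytes_py : Prop := ∀ (data : Int) (keep : Int), Dom_beat_to_bytes_py data keep → Pre_beat_to_bytes_py data keep → Spec_beat_to_bytes_py data keep (beat_to_bytes_py data keep)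

-- ===== LEMMAS AND PROOFS =====

-- the 64-bit complement of keep, as the Nat it is on each sign of keep
def pvQn (keep : Int) : Nat :=
  match keep with
  | .ofNat n => 2 ^ 64 - 1 - n % 2 ^ 64
  | .negSucc n => n % 2 ^ 64

lemma pvQn_lt (keep : Int) : pvQn keep < 2 ^ 64 := by
  have h : 0 < 2 ^ 64 := by positivity
  cases keep with
  | ofNat n => simp only [pvQn]; omega
  | negSucc n => simpa [pvQn] using Nat.mod_lt _ h

-- (~keep) & (2^64 - 1) is exactly pvQn keep
lemma pvBandNot_eq (keep : Int) :
    PySem.Int.band (Int.not keep) ((1 <<< 64) - 1) = (pvQn keep : Int) := by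
  have hb : ((1 <<< 64 : Int) - 1) = ((2 ^ 64 - 1 : Nat) : Int) := by decide
  cases keep with
  | ofNat n =>
    have hnot : Int.not (Int.ofNat n) = Int.negSucc n := rfl
    rw [hnot, hb]
    simp only [PySem.Int.band]
    rw [if_neg (by omega), if_pos (by positivity)]
    have h1 : (-(Int.negSucc n) - 1).toNat = n := by simp [Int.negSucc_eq]
    have h2 : ((2 ^ 64 - 1 : Nat) : Int).toNat = 2 ^ 64 - 1 := by simp
    rw [h1, h2, Nat.and_comm, Nat.and_two_pow_sub_one_eq_mod]
    simp [pvQn]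
  | negSucc n =>
    have hnot : Int.not (Int.negSucc n) = Int.ofNat n := rfl
    rw [hnot, hb]
    simp only [PySem.Int.band]
    rw [if_pos (show (0:Int) ≤ Int.ofNat n from Int.natCast_nonneg n), if_pos (by positivity)]
    have h2 : ((2 ^ 64 - 1 : Nat) : Int).toNat = 2 ^ 64 - 1 := by simp
    rw [h2, show (Int.ofNat n).toNat = n from rfl, Nat.and_two_pow_sub_one_eq_mod]
    simp [pvQn]

-- testBit as a division/parity test
lemma pvTestBit_div (q : Nat) : ∀ w, q.testBit w = decide (q / 2 ^ w % 2 = 1) := by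
  intro w
  induction w generalizing q with
  | zero => simp [Nat.testBit_zero]
  | succ w ih => rw [Nat.testBit_succ, ih, Nat.div_div_eq_div_mul, ← pow_succ']

-- complement within width w flips every bit below w
lemma pvTestBit_compl (k : Nat) : ∀ w m, m < 2 ^ w → k < w →
    (2 ^ w - 1 - m).testBit k = !m.testBit k := by
  induction k with
  | zero =>
    intro w m hm hk
    obtain ⟨w', rfl⟩ : ∃ w', w = w' + 1 := ⟨w - 1, by omega⟩
    have h2 : 2 ^ (w' + 1) = 2 * 2 ^ w' := by rw [pow_succ]; ring
    have hp : 0 < 2 ^ w' := by positivity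
    simp only [Nat.testBit_zero]
    rcases Nat.mod_two_eq_zero_or_one m with h | h
    · have hx : (2 ^ (w' + 1) - 1 - m) % 2 = 1 := by omega
      simp [hx, h]
    · have hx : (2 ^ (w' + 1) - 1 - m) % 2 = 0 := by omega
      simp [hx, h]
  | succ k ih =>
    intro w m hm hk
    obtain ⟨w', rfl⟩ : ∃ w', w = w' + 1 := ⟨w - 1, by omega⟩
    have h2 : 2 ^ (w' + 1) = 2 * 2 ^ w' := by rw [pow_succ]; ring
    have hd : (2 ^ (w' + 1) - 1 - m) / 2 = 2 ^ w' - 1 - m / 2 := by omega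
    rw [Nat.testBit_succ, Nat.testBit_succ, hd, ih w' (m / 2) (by omega) (by omega)]

-- A's per-bit test 'keep & (1 << p)' reads the complemented bit of pvQn keep
lemma pvBandShift (keep : Int) (p : Nat) (hp : p < 64) :
    (PySem.Int.band keep (1 <<< p) ≠ 0) ↔ (pvQn keep).testBit p = false := by
  have hb : ((1 <<< p : Int)) = ((2 ^ p : Nat) : Int) := by norm_num [Nat.shiftLeft_eq]
  have hppos : 0 < 2 ^ p := by positivity
  cases keep with
  | ofNat n =>
    rw [hb]
    simp only [PySem.Int.band]
    rw [if_pos (show (0:Int) ≤ Int.ofNat n from Int.natCast_nonneg n),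
        if_pos (by positivity)]
    rw [show (Int.ofNat n).toNat = n from rfl,
        show ((2 ^ p : Nat) : Int).toNat = 2 ^ p from Int.toNat_natCast _]
    rw [Nat.and_two_pow]
    have hq : (pvQn (Int.ofNat n)).testBit p = !(n.testBit p) := by
      show ((2 ^ 64 - 1 - n % 2 ^ 64).testBit p) = !(n.testBit p)
      rw [pvTestBit_compl p 64 (n % 2 ^ 64) (Nat.mod_lt _ (by positivity)) hp,
          Nat.testBit_mod_two_pow]
      simp [hp]
    rw [hq]
    cases hnb : n.testBit p <;> simp
  | negSucc n =>
    rw [hb]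
    simp only [PySem.Int.band]
    rw [if_neg (show ¬ (0:Int) ≤ Int.negSucc n from by rw [Int.negSucc_eq]; omega),
        if_pos (by positivity)]
    rw [show (-(Int.negSucc n) - 1).toNat = n from by simp [Int.negSucc_eq],
        show ((2 ^ p : Nat) : Int).toNat = 2 ^ p from Int.toNat_natCast _]
    rw [Nat.two_pow_and]
    have hq : (pvQn (Int.negSucc n)).testBit p = n.testBit p := by
      show ((n % 2 ^ 64).testBit p) = n.testBit p
      rw [Nat.testBit_mod_two_pow]
      simp [hp]
    rw [hq]
    cases hnb : n.testBit p <;> simp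

lemma pvBitLength_eq_size (q : Nat) : PySem.Int.bitLength (q : Int) = Nat.size q := by
  rcases Nat.eq_zero_or_pos q with rfl | hq
  · simp [PySem.Int.bitLength_zero]
  · have h1 := PySem.Int.lt_two_pow_bitLength (q : Int)
    rw [Int.natAbs_natCast] at h1
    have h2 := PySem.Int.two_pow_bitLength_le (q : Int) (by exact_mod_cast hq.ne')
    rw [Int.natAbs_natCast] at h2
    have hle : Nat.size q ≤ PySem.Int.bitLength (q : Int) := Nat.size_le.mpr h1
    have := Nat.lt_size.mpr h2
    omega

-- leading zeros of q, scanning positions w-1, w-2, … MSB-first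
def pvLZ (q : Nat) : Nat → Nat
  | 0 => 0
  | w + 1 => if q.testBit w then 0 else pvLZ q w + 1

lemma pvLZ_size (q : Nat) : ∀ w, q < 2 ^ w → pvLZ q w = w - Nat.size q := by
  intro w
  induction w with
  | zero => intro h; interval_cases q; simp [pvLZ]
  | succ w ih =>
    intro hq
    have h2 : 2 ^ (w + 1) = 2 * 2 ^ w := by rw [pow_succ]; ring
    by_cases hb : q.testBit w
    · have hge : 2 ^ w ≤ q := by
        by_contra h
        rw [pvTestBit_div, Nat.div_eq_of_lt (by omega)] at hb
        simp at hb
      have hsz : Nat.size q = w + 1 :=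
        le_antisymm (Nat.size_le.mpr hq) (Nat.lt_size.mpr hge)
      simp [pvLZ, hb, hsz]
    · have hlt : q < 2 ^ w := by
        by_contra h
        have hdiv : q / 2 ^ w = 1 := Nat.div_eq_of_lt_le (by omega) (by omega)
        rw [pvTestBit_div, hdiv] at hb
        simp at hb
      have hsz : Nat.size q ≤ w := Nat.size_le.mpr hlt
      rw [show pvLZ q (w + 1) = pvLZ q w + 1 from by simp [pvLZ, hb], ih hlt]
      omega

lemma pvLoopA_take (db : List Int) (hdb : db.length = 64) (keep : Int) :
    ∀ n, n ≤ 64 → ∀ acc,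
      beatLoopA db keep (64 - n) acc
        = acc ++ (db.drop (64 - n)).take (pvLZ (pvQn keep) n) := by
  intro n
  induction n with
  | zero =>
    intro _ acc
    rw [beatLoopA]
    simp [pvLZ]
  | succ n ih =>
    intro hn acc
    have hi : 64 - (n + 1) < 64 := by omega
    have hp : 64 - 1 - (64 - (n + 1)) = n := by omega
    rw [beatLoopA, dif_pos hi, hp]
    by_cases hbit : (pvQn keep).testBit n
    · -- bit of keep is 0: the loop breaks, pvLZ counts 0
      rw [if_neg (show ¬ PySem.Int.band keep (1 <<< n) ≠ 0 from fun hne =>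
        by simp [(pvBandShift keep n (by omega)).mp hne] at hbit)]
      simp [pvLZ, hbit]
    · -- bit of keep is 1: take this byte and continue
      rw [if_pos ((pvBandShift keep n (by omega)).mpr (by simp [hbit]))]
      have hstep : 64 - (n + 1) + 1 = 64 - n := by omega
      rw [hstep, ih (by omega)]
      have hidx : 64 - (n + 1) < db.length := by omega
      have hget : PySem.List.pyGetD db ((64 - (n + 1) : Nat) : Int) 0
          = db[64 - (n + 1)] := by
        rw [PySem.List.pyGetD_natCast]
        exact List.getD_eq_getElem db 0 hidx
      have hdrop : db.drop (64 - (n + 1)) = db[64 - (n + 1)] :: db.drop (64 - n) := by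
        rw [List.drop_eq_getElem_cons hidx, hstep]
      rw [hget, hdrop]
      simp [pvLZ, hbit, List.append_assoc]

lemma pvToBytes64_length (data : Int) : (pvToBytes64 data).length = 64 := by
  simp [pvToBytes64]

-- ===== VERDICT (by name: the statement is the Claim_ definition above) =====
theorem beat_to_bytes_py_spec : Claim_equal_beat_to_bytes_py := by
  intro data keep _ _
  unfold Spec_beat_to_bytes_py beat_to_bytes_py beat_to_bytes_py_alt
  have hlen := pvToBytes64_length data
  have hloop := pvLoopA_take (pvToBytes64 data) hlen keep 64 (by omega) []
  have hlt := pvQn_lt keep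
  have hsz : Nat.size (pvQn keep) ≤ 64 := Nat.size_le.mpr hlt
  rw [show (64 : Nat) - 64 = 0 from rfl] at hloop
  rw [hloop, pvBandNot_eq, pvBitLength_eq_size, pvLZ_size _ 64 hlt]
  rw [PySem.List.slice_to _ (by push_cast; omega)]
  simp only [List.drop_zero, List.nil_append]
  congr 1
  omega
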